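-- pv_equiv track=rewrite | github.com/requiemwell/desafio_Big_Data | desafio_1.py | validaS
-- ===== SOURCE A (Python) =====
-- def validaS(lista: list) -> tuple:
--     """ Função que auxilia na validaçao da soma """
--     if lista:
--         menor = lista[0]
--         somatot = 0
--         for i in lista:
--             if i < menor:
--                 menor = i
--             somatot += i
--         return menor, somatot
--     return 0, 0
-- ===== SOURCE B (Python) =====
-- def validaS(lista: list) -> tuple:
--     """ Função que auxilia na validaçao da soma """
--     if not lista:
--         return 0, 0
--     return sorted(lista)[0], sum(lista)
-- ===== Notes on version B (the rewrite author's own statement) =====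
-- stated objective: alternative
-- what changed: Replaces A's single fused accumulator loop (running minimum plus running sum) with an empty guard, a sort of the list taking its first element as the minimum, and a separate sum reduction.
import Mathlib
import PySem

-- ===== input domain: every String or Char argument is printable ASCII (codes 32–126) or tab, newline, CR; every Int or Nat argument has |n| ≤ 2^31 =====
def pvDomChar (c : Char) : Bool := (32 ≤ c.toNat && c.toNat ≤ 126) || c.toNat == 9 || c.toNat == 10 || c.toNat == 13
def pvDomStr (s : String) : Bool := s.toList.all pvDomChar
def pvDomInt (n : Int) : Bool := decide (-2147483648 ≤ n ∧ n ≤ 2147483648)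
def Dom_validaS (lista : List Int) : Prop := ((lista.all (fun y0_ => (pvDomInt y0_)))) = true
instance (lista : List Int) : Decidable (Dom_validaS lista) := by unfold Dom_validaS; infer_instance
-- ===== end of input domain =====

-- B replaces A's single fused accumulator loop with an empty guard, a sort of the
-- list whose first element is the minimum, and a separate sum reduction (objective: alternative).

-- ===== PORT A =====
-- fused loop: state (menor, somatot), updated once per element of lista
def validaS (lista : List Int) : Int × Int :=
  match lista with
  | [] => (0, 0)
  | h :: _ =>
    lista.foldl (fun p i => (if i < p.1 then i else p.1, p.2 + i)) (h, 0)

-- ===== PORT B =====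
-- sorted(lista)[0]: indexing a nonempty sorted list at 0 (guard ensures nonemptiness)
def validaS_alt (lista : List Int) : Int × Int :=
  if lista = [] then (0, 0)
  else ((PySem.List.pyGet? (PySem.List.sorted lista (fun x => x)) 0).getD 0, lista.sum)

-- ===== PRECONDITION & SPEC =====
def Spec_validaS (lista : List Int) (out : Int × Int) : Prop := out = validaS_alt lista
instance (lista : List Int) (out : Int × Int) : Decidable (Spec_validaS lista out) := by unfold Spec_validaS; infer_instance

-- ===== CLAIM (what is proved, stated in full; the proofs are below) =====
def Claim_equal_validaS : Prop := ∀ (lista : List Int), Dom_validaS lista → Spec_validaS lista (validaS lista)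

-- ===== LEMMAS AND PROOFS =====
theorem validaS_fold (l : List Int) : ∀ (m s : Int),
    l.foldl (fun p i => (if i < p.1 then i else p.1, p.2 + i)) (m, s)
      = (l.foldl min m, s + l.sum) := by
  induction l with
  | nil => intro m s; simp
  | cons a l ih =>
    intro m s
    have h1 : (if a < m then a else m) = min m a := by
      rcases lt_or_ge a m with h | h <;> simp [min_def] <;> omega
    simp [List.foldl, h1, ih]
    ring

theorem foldl_min_spec (l : List Int) : ∀ (m : Int),
    l.foldl min m ∈ m :: l ∧ ∀ y ∈ m :: l, l.foldl min m ≤ y := by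
  induction l with
  | nil => intro m; simp
  | cons a l ih =>
    intro m
    obtain ⟨hmem, hle⟩ := ih (min m a)
    constructor
    · simp only [List.foldl]
      rcases List.mem_cons.1 hmem with h | h
      · rw [h]
        rcases le_total m a with hma | hma
        · rw [min_eq_left hma]; exact List.mem_cons_self
        · rw [min_eq_right hma]
          exact List.mem_cons_of_mem _ List.mem_cons_self
      · exact List.mem_cons_of_mem _ (List.mem_cons_of_mem _ h)
    · intro y hy
      simp only [List.foldl]
      rcases List.mem_cons.1 hy with h | h
      · subst h
        exact le_trans (hle _ (List.mem_cons_self)) (min_le_left _ _)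
      · rcases List.mem_cons.1 h with h' | h'
        · subst h'
          exact le_trans (hle _ (List.mem_cons_self)) (min_le_right _ _)
        · exact hle _ (List.mem_cons_of_mem _ h')

-- head of the sorted list = the running minimum of A's loop
theorem sorted_head_eq_foldl_min (h : Int) (t : List Int) :
    ∃ m tl, PySem.List.sorted (h :: t) (fun x => x) = m :: tl ∧ m = t.foldl min h := by
  cases hs : PySem.List.sorted (h :: t) (fun x => x) with
  | nil => exact absurd ((PySem.List.sorted_eq_nil_iff _ _ _).1 hs) (by simp)
  | cons m tl =>
    refine ⟨m, tl, rfl, ?_⟩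
    obtain ⟨hmem, hle⟩ := foldl_min_spec t h
    have hm_mem : m ∈ h :: t := by
      have := PySem.List.mem_sorted (h :: t) (fun x => x) false m
      rw [hs] at this
      exact this.1 (List.mem_cons_self)
    have h1 : m ≤ t.foldl min h :=
      PySem.List.key_head_sorted_le (h :: t) (fun x => x) hs _ hmem
    have h2 : t.foldl min h ≤ m := hle _ hm_mem
    omega

-- ===== VERDICT (by name: the statement is the Claim_ definition above) =====
theorem validaS_spec : Claim_equal_validaS := by
  intro lista _
  unfold Spec_validaS validaS validaS_alt
  cases lista with
  | nil => rfl
  | cons h t =>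
    obtain ⟨m, tl, hs, hm⟩ := sorted_head_eq_foldl_min h t
    simp [validaS_fold, hs, hm, PySem.List.pyGet?, PySem.List.pyIdx?]
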